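-- pv_equiv track=rewrite | github.com/DeveloperAlfa/Anti-ELIZA | fite.py | tokenise
-- ===== SOURCE A (Python) =====
-- punc = ['.', ',', '"', '!', '~']
--
-- def tokenise(s):
--     ans = ""
--     l = []
--     p = []
--     for c in s:
--         if c not in punc:
--             if(len(ans)==0 and c==' '):
--                 continue
--             ans+=c
--         else:
--             l.append(ans+" ")
--             ans = ""
--             p.append(c)
--     l.append(ans+" ")
--     return l, p
-- ===== SOURCE B (Python) =====
-- import re
--
-- def tokenise(s):
--     parts = re.split(r'([.,"!~])', s)
--     l = [parts[i].lstrip(' ') + ' ' for i in range(0, len(parts), 2)]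
--     p = [parts[i] for i in range(1, len(parts), 2)]
--     return l, p
-- ===== Notes on version B (the rewrite author's own statement) =====
-- stated objective: idiomatic
-- what changed: Replaces A's character-by-character accumulator state machine with a single regex split on a captured punctuation class, then maps even-index segments to space-lstripped tokens and odd-index captures to the punctuation list.
import Mathlib
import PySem

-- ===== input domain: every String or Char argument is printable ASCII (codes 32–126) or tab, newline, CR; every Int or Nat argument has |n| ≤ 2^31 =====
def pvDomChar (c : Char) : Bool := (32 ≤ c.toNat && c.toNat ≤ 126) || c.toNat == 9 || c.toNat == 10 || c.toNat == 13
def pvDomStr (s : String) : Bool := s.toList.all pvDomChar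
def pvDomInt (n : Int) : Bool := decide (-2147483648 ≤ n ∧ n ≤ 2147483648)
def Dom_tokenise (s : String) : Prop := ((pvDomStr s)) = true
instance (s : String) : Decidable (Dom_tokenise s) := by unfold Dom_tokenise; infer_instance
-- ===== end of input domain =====

-- B replaces A's char-by-char state machine by a split-on-punctuation pass plus per-segment mapping (idiomatic re.split decomposition); return values proved equal on all Dom inputs.


-- ===== PORT A =====
-- punc = ['.', ',', '"', '!', '~']
def puncA : List Char := ['.', ',', '"', '!', '~']

-- the for-loop of A, state (ans, l, p), char by char
def tokLoopA : List Char → List Char → List String → List String → List String × List String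
  | [], ans, l, p => (l ++ [String.mk (ans ++ [' '])], p)
  | c :: cs, ans, l, p =>
    if c ∈ puncA then
      tokLoopA cs [] (l ++ [String.mk (ans ++ [' '])]) (p ++ [String.mk [c]])
    else
      if ans = [] ∧ c = ' ' then tokLoopA cs ans l p
      else tokLoopA cs (ans ++ [c]) l p

def tokenise (s : String) : List String × List String :=
  tokLoopA s.toList [] [] []

-- ===== PORT B =====
-- re.split(r'([.,"!~])', s): list of segments (len = #delims + 1) and the captured delimiters
def resplitB : List Char → List (List Char) × List Char
  | [] => ([[]], [])
  | c :: cs =>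
    match resplitB cs with
    | (segs, ds) =>
      if c ∈ puncA then ([] :: segs, c :: ds)
      else
        match segs with
        | [] => ([[c]], ds)          -- unreachable: resplitB always yields ≥ 1 segment
        | seg :: rest => ((c :: seg) :: rest, ds)

-- parts[i].lstrip(' ') + ' '  for the even (segment) positions
def segTokB (seg : List Char) : String := String.mk (seg.dropWhile (· = ' ') ++ [' '])

def tokenise_alt (s : String) : List String × List String :=
  match resplitB s.toList with
  | (segs, ds) => (segs.map segTokB, ds.map (fun c => String.mk [c]))

-- ===== PRECONDITION & SPEC =====
def Spec_tokenise (s : String) (out : List String × List String) : Prop := out = tokenise_alt s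
instance (s : String) (out : List String × List String) : Decidable (Spec_tokenise s out) := by unfold Spec_tokenise; infer_instance

-- ===== CLAIM (what is proved, stated in full; the proofs are below) =====
def Claim_equal_tokenise : Prop := ∀ (s : String), Dom_tokenise s → Spec_tokenise s (tokenise s)

-- ===== LEMMAS AND PROOFS =====

-- what A's loop does to the first segment, given the pending accumulator ans
def hStrip (ans seg : List Char) : List Char :=
  if ans = [] then seg.dropWhile (· = ' ') else ans ++ seg

def consMap (ans : List Char) : List (List Char) → List String
  | [] => []
  | h :: t => String.mk (hStrip ans h ++ [' ']) :: t.map segTokB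

theorem resplitB_ne (cs : List Char) : (resplitB cs).1 ≠ [] := by
  induction cs with
  | nil => simp [resplitB]
  | cons c cs ih =>
    simp only [resplitB]
    rcases h : resplitB cs with ⟨segs, ds⟩
    by_cases hc : c ∈ puncA
    · simp [hc]
    · cases segs with
      | nil => simp [hc]
      | cons seg rest => simp [hc]

theorem tokLoopA_eq (cs : List Char) : ∀ (ans : List Char) (l p : List String),
    tokLoopA cs ans l p =
      (l ++ consMap ans (resplitB cs).1,
       p ++ (resplitB cs).2.map (fun c => String.mk [c])) := by
  induction cs with
  | nil =>
    intro ans l p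
    by_cases ha : ans = [] <;>
      simp [tokLoopA, resplitB, consMap, hStrip, ha]
  | cons c cs ih =>
    intro ans l p
    rcases h : resplitB cs with ⟨segs, ds⟩
    have hne : segs ≠ [] := by have := resplitB_ne cs; rw [h] at this; exact this
    cases segs with
    | nil => exact absurd rfl hne
    | cons seg rest =>
      by_cases hc : c ∈ puncA
      · -- punctuation: close current token
        simp only [tokLoopA, hc, if_pos, resplitB, h]
        rw [ih [] _ _]
        rw [h]
        have : consMap [] (seg :: rest) = (seg :: rest).map segTokB := by
          simp [consMap, segTokB, hStrip]
        by_cases ha : ans = [] <;> simp [consMap, hStrip, segTokB, ha]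
      · by_cases hsk : ans = [] ∧ c = ' '
        · -- skipped leading space
          obtain ⟨ha, hc'⟩ := hsk
          subst ha; subst hc'
          rw [show tokLoopA (' ' :: cs) [] l p = tokLoopA cs [] l p from by
            simp [tokLoopA, hc]]
          rw [ih [] l p, h]
          simp [resplitB, h, hc, consMap, hStrip, List.dropWhile]
        · -- accumulate c
          simp only [tokLoopA, hc, if_neg, hsk, if_neg, not_false_iff]
          rw [ih (ans ++ [c]) l p, h]
          simp only [resplitB, h, hc, if_neg, not_false_iff]
          have harg : hStrip (ans ++ [c]) seg = hStrip ans (c :: seg) := by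
            by_cases ha : ans = []
            · subst ha
              have hcsp : c ≠ ' ' := fun hc' => hsk ⟨rfl, hc'⟩
              simp [hStrip, List.dropWhile, hcsp]
            · simp [hStrip, ha]
          simp [consMap, harg]

-- ===== VERDICT (by name: the statement is the Claim_ definition above) =====
theorem tokenise_spec : Claim_equal_tokenise := by
  intro s _
  unfold Spec_tokenise tokenise tokenise_alt
  rw [tokLoopA_eq]
  rcases h : resplitB s.toList with ⟨segs, ds⟩
  have hne : segs ≠ [] := by have := resplitB_ne s.toList; rw [h] at this; exact this
  cases segs with
  | nil => exact absurd rfl hne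
  | cons seg rest => simp [consMap, segTokB, hStrip]
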